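-- pv_equiv track=rewrite | github.com/luke-t-m/advent_of_code | 3_2018/1_day1_python/z_1_ai_p2_22.py | first_duplicate_frequency
-- ===== SOURCE A (Python) =====
-- def first_duplicate_frequency(changes):
--   seen = set()
--   current = 0
--   seen.add(current)
--
--   while True:
--     for change in changes:
--       current += change
--       if current in seen:
--         return current
--       seen.add(current)
-- ===== SOURCE B (Python) =====
-- def first_duplicate_frequency(changes):
--     n = len(changes)
--     prefix = []
--     acc = 0
--     for c in changes:
--         prefix.append(acc)
--         acc += c
--     total = acc
--     if total == 0:
--         seen = set()
--         for p in prefix: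
--             if p in seen:
--                 return p
--             seen.add(p)
--         return 0
--     best = None
--     for j in range(n):
--         for i in range(n):
--             d = prefix[i] - prefix[j]
--             if d % total == 0:
--                 k = d // total
--                 if k >= 1 or (k == 0 and i < j):
--                     step = k * n + j
--                     if best is None or step < best[0]:
--                         best = (step, prefix[i])
--     return best[1]
-- ===== Notes on version B (the rewrite author's own statement) =====
-- stated objective: alternative
-- what changed: A simulates the frequency stream step by step with a growing seen-set until a repeat; B computes one cycle of prefix sums and, when the cycle total is nonzero, returns the value of the earliest collision chosen by a closed-form minimisation over congruent prefix-sum pairs (mod the total), never iterating over cycles.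
import Mathlib
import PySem

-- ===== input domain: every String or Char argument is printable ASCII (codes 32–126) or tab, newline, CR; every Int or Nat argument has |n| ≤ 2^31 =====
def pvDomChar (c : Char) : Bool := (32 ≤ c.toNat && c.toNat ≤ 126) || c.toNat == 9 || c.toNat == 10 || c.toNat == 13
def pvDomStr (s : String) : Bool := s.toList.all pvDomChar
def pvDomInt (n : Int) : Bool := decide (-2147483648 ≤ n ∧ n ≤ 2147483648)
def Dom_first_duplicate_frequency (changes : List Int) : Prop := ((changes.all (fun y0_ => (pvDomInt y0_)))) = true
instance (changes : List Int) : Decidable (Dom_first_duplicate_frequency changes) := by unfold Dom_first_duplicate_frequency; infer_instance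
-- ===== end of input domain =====

-- B replaces A's unbounded step-by-step simulation with one pass of prefix sums plus a
-- closed-form minimisation over congruent prefix pairs (mod the cycle total); equivalence
-- is proved on Pre_ = exactly the inputs where A's while-True loop terminates.

-- ===== PORT A =====
-- inner 'for change in changes' loop: early return (.inl) or fallthrough state (.inr)
def fdfInner : List Int → Int → PySem.Set Int → Sum Int (Int × PySem.Set Int)
  | [], current, seen => Sum.inr (current, seen)
  | c :: rest, current, seen =>
    let cur := current + c
    if PySem.Set.contains seen cur then Sum.inl cur
    else fdfInner rest cur (PySem.Set.add seen cur)

-- 'while True': fuel counts whole cycles; lemma fdfLoop_spec below shows the fuel chosen in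
-- first_duplicate_frequency is never exhausted on inputs satisfying Pre_.
def fdfLoop (changes : List Int) : Nat → Int → PySem.Set Int → Int
  | 0, current, _ => current
  | fuel+1, current, seen =>
    match fdfInner changes current seen with
    | Sum.inl r => r
    | Sum.inr (cur, s) => fdfLoop changes fuel cur s

def first_duplicate_frequency (changes : List Int) : Int :=
  fdfLoop changes (2 * (changes.map Int.natAbs).sum + 2) 0
    (PySem.Set.add PySem.Set.empty 0)

-- ===== PORT B =====
-- the total == 0 branch: first prefix value seen twice, else 0
def fdfScan : List Int → PySem.Set Int → Int
  | [], _ => 0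
  | p :: rest, seen =>
    if PySem.Set.contains seen p then p else fdfScan rest (PySem.Set.add seen p)

-- the nested 'for j in range(n): for i in range(n)' candidate minimisation
def fdfBest (pref : List Int) (total n : Int) : Option (Int × Int) :=
  (PySem.List.pyRange 0 n 1).foldl (fun best j =>
    (PySem.List.pyRange 0 n 1).foldl (fun best i =>
      let d := PySem.List.pyGetD pref i 0 - PySem.List.pyGetD pref j 0
      if PySem.Int.mod d total = 0 then
        let k := PySem.Int.floordiv d total
        if 1 ≤ k ∨ (k = 0 ∧ i < j) then
          let step := k * n + j
          match best with
          | none => some (step, PySem.List.pyGetD pref i 0)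
          | some b => if step < b.1 then some (step, PySem.List.pyGetD pref i 0) else best
        else best
      else best) best) none

def first_duplicate_frequency_alt (changes : List Int) : Int :=
  let st := changes.foldl (fun (st : List Int × Int) c => (st.1 ++ [st.2], st.2 + c)) ([], 0)
  let pref := st.1
  let total := st.2
  if total = 0 then fdfScan pref PySem.Set.empty
  else
    -- Source B's 'best[1]': under Pre_ best is never None; .getD makes the function total
    ((fdfBest pref total (PySem.List.len changes)).getD (0, 0)).2

-- ===== PRECONDITION & SPEC =====
def pvPrefix (changes : List Int) : List Int :=
  (List.range changes.length).map (fun i => (changes.take i).sum)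

-- Pre_ = exactly the inputs on which A's while-True loop terminates: the list is nonempty and
-- either the cycle total is 0 or two one-cycle prefix sums are congruent mod the total
-- (otherwise the running frequency never repeats and A loops forever).
def Pre_first_duplicate_frequency (changes : List Int) : Prop :=
  changes ≠ [] ∧ (changes.sum = 0 ∨
    ¬ ((pvPrefix changes).map (fun p => PySem.Int.mod p changes.sum)).Nodup)

instance (changes : List Int) : Decidable (Pre_first_duplicate_frequency changes) := by
  unfold Pre_first_duplicate_frequency; infer_instance

def pvWitness_first_duplicate_frequency : List Int := [1, -1]

def Spec_first_duplicate_frequency (changes : List Int) (out : Int) : Prop := out = first_duplicate_frequency_alt changes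
instance (changes : List Int) (out : Int) : Decidable (Spec_first_duplicate_frequency changes out) := by unfold Spec_first_duplicate_frequency; infer_instance

-- ===== CLAIM (what is proved, stated in full; the proofs are below) =====
def Claim_equal_first_duplicate_frequency : Prop := ∀ (changes : List Int), Dom_first_duplicate_frequency changes → Pre_first_duplicate_frequency changes → Spec_first_duplicate_frequency changes (first_duplicate_frequency changes)

-- ===== LEMMAS AND PROOFS =====

-- the mathematical frequency stream: sVal changes m = the running frequency after m steps
def sVal (changes : List Int) (m : Nat) : Int :=
  ((m / changes.length : Nat) : Int) * changes.sum + (changes.take (m % changes.length)).sum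

-- step m repeats an earlier frequency
def dupAt (changes : List Int) (m : Nat) : Prop :=
  ∃ m' < m, sVal changes m' = sVal changes m

lemma sVal_zero (changes : List Int) : sVal changes 0 = 0 := by
  simp [sVal]

lemma pvPrefix_length (changes : List Int) : (pvPrefix changes).length = changes.length := by
  simp [pvPrefix]

-- candidate data for the total ≠ 0 branch of B
def candK (changes : List Int) (i j : Nat) : Int :=
  PySem.Int.floordiv ((changes.take i).sum - (changes.take j).sum) changes.sum

def candValid (changes : List Int) (i j : Nat) : Prop :=
  i < changes.length ∧ j < changes.length ∧
  changes.sum ∣ ((changes.take i).sum - (changes.take j).sum) ∧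
  (1 ≤ candK changes i j ∨ (candK changes i j = 0 ∧ i < j))

def candStepN (changes : List Int) (i j : Nat) : Nat :=
  (candK changes i j).toNat * changes.length + j

-- the min-keeping update of Source B's inner branch
def updMin (best : Option (Int × Int)) : Option (Int × Int) → Option (Int × Int)
  | none => best
  | some p => match best with
    | none => some p
    | some b => if p.1 < b.1 then some p else best

-- the candidate the inner branch of fdfBest produces for the Int pair (j, i)
def candOptI (pref : List Int) (total n : Int) (x : Int × Int) : Option (Int × Int) :=
  let d := PySem.List.pyGetD pref x.2 0 - PySem.List.pyGetD pref x.1 0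
  if PySem.Int.mod d total = 0 then
    let k := PySem.Int.floordiv d total
    if 1 ≤ k ∨ (k = 0 ∧ x.2 < x.1) then some (k * n + x.1, PySem.List.pyGetD pref x.2 0)
    else none
  else none

lemma sVal_qr (changes : List Int) (q r : Nat) (hr : r < changes.length) :
    sVal changes (q * changes.length + r)
      = (q : Int) * changes.sum + (changes.take r).sum := by
  have hn : 0 < changes.length := lt_of_le_of_lt (Nat.zero_le _) hr
  unfold sVal
  rw [Nat.mul_comm q changes.length, Nat.mul_add_div hn, Nat.mul_add_mod,
    Nat.div_eq_of_lt hr, Nat.mod_eq_of_lt hr]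
  simp

lemma take_sum_succ (changes : List Int) (r : Nat) (hr : r < changes.length) :
    (changes.take (r + 1)).sum = (changes.take r).sum + changes.getD r 0 := by
  rw [List.take_add_one, List.sum_append]
  simp [List.getElem?_eq_getElem hr, List.getD_eq_getElem?_getD]

lemma sVal_step (changes : List Int) (m : Nat) (hn : changes ≠ []) :
    sVal changes (m + 1) = sVal changes m + changes.getD (m % changes.length) 0 := by
  have hn0 : 0 < changes.length := List.length_pos_iff.mpr hn
  obtain ⟨q, r, hr, hm⟩ : ∃ q r, r < changes.length ∧ m = q * changes.length + r :=
    ⟨m / changes.length, m % changes.length, Nat.mod_lt _ hn0, by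
      rw [Nat.mul_comm]; exact (Nat.div_add_mod m _).symm⟩
  have hmod : m % changes.length = r := by
    subst hm; rw [Nat.mul_comm, Nat.mul_add_mod, Nat.mod_eq_of_lt hr]
  rw [hmod]
  subst hm
  rcases Nat.lt_or_ge (r + 1) changes.length with h | h
  · have h1 : q * changes.length + r + 1 = q * changes.length + (r+1) := by omega
    rw [h1, sVal_qr _ _ _ h, sVal_qr _ _ _ hr, take_sum_succ _ _ hr]
    ring
  · have he : r + 1 = changes.length := by omega
    have h1 : q * changes.length + r + 1 = (q+1) * changes.length + 0 := by
      rw [Nat.add_mul, Nat.one_mul]; omega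
    rw [h1, sVal_qr _ _ _ hn0, sVal_qr _ _ _ hr]
    have h2 : (changes.take r).sum + changes.getD r 0 = changes.sum := by
      rw [← take_sum_succ _ _ hr, he, List.take_length]
    push_cast
    rw [add_assoc, h2]
    simp; ring

lemma abs_take_sum_le (changes : List Int) (i : Nat) :
    ((changes.take i).sum).natAbs ≤ (changes.map Int.natAbs).sum := by
  calc ((changes.take i).sum).natAbs ≤ ((changes.take i).map Int.natAbs).sum := by
        induction (changes.take i) with
        | nil => simp
        | cons a l ih => simpa using le_trans (Int.natAbs_add_le a l.sum) (by omega)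
    _ = ((changes.map Int.natAbs).take i).sum := by rw [List.map_take]
    _ ≤ (changes.map Int.natAbs).sum := by
        conv_rhs => rw [← List.take_append_drop i (changes.map Int.natAbs)]
        rw [List.sum_append]; exact Nat.le_add_right _ _

lemma mod_eq_imp_dvd (a b t : Int) (h : PySem.Int.mod a t = PySem.Int.mod b t) :
    t ∣ (a - b) := by
  have ha := PySem.Int.floordiv_mul_add_mod a t
  have hb := PySem.Int.floordiv_mul_add_mod b t
  exact ⟨PySem.Int.floordiv a t - PySem.Int.floordiv b t, by linear_combination ha.symm - hb.symm + h⟩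

lemma candK_spec (changes : List Int) (i j : Nat) (ht : changes.sum ≠ 0)
    (hdvd : changes.sum ∣ ((changes.take i).sum - (changes.take j).sum)) :
    candK changes i j * changes.sum = (changes.take i).sum - (changes.take j).sum := by
  have h := PySem.Int.floordiv_mul_add_mod ((changes.take i).sum - (changes.take j).sum) changes.sum
  have hz : PySem.Int.mod ((changes.take i).sum - (changes.take j).sum) changes.sum = 0 :=
    (PySem.Int.mod_eq_zero_iff_dvd _ _).mpr hdvd
  unfold candK
  omega

lemma prefix_fold_aux (l : List Int) : ∀ (pre : List Int) (acc : Int),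
    l.foldl (fun (st : List Int × Int) c => (st.1 ++ [st.2], st.2 + c)) (pre, acc)
      = (pre ++ (List.range l.length).map (fun i => acc + (l.take i).sum), acc + l.sum) := by
  induction l with
  | nil => simp
  | cons c rest ih =>
    intro pre acc
    rw [List.foldl_cons, ih]
    simp only [Prod.mk.injEq]
    refine ⟨?_, by simp [List.sum_cons]; ring⟩
    rw [List.length_cons, List.range_succ_eq_map, List.map_cons, List.map_map]
    simp only [List.take_zero, List.sum_nil, add_zero, List.append_assoc, List.singleton_append]
    congr 1
    congr 1
    apply List.map_congr_left
    intro i _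
    simp [List.sum_cons]
    ring

lemma prefix_fold (changes : List Int) :
    changes.foldl (fun (st : List Int × Int) c => (st.1 ++ [st.2], st.2 + c)) ([], 0)
      = (pvPrefix changes, changes.sum) := by
  rw [prefix_fold_aux]
  simp [pvPrefix]

lemma sVal_lt (changes : List Int) (r : Nat) (hr : r < changes.length) :
    sVal changes r = (changes.take r).sum := by
  have := sVal_qr changes 0 r hr
  simpa using this

lemma sVal_cycle0 (changes : List Int) (hn : changes ≠ []) :
    sVal changes changes.length = changes.sum := by
  have hn0 : 0 < changes.length := List.length_pos_iff.mpr hn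
  have := sVal_qr changes 1 0 hn0
  simpa using this

-- a valid candidate is a duplicate step with the stated value

lemma cand_dup (changes : List Int) (i j : Nat) (ht : changes.sum ≠ 0)
    (hv : candValid changes i j) :
    dupAt changes (candStepN changes i j)
    ∧ sVal changes (candStepN changes i j) = (changes.take i).sum := by
  obtain ⟨hi, hj, hdvd, hk⟩ := hv
  have hk0 : 0 ≤ candK changes i j := by rcases hk with h | h <;> omega
  have hks := candK_spec changes i j ht hdvd
  have hsv : sVal changes (candStepN changes i j) = (changes.take i).sum := by
    unfold candStepN
    rw [sVal_qr changes _ j hj]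
    have : ((candK changes i j).toNat : Int) = candK changes i j := Int.toNat_of_nonneg hk0
    rw [this]
    omega
  refine ⟨⟨i, ?_, ?_⟩, hsv⟩
  · unfold candStepN
    rcases hk with h | h
    · have : changes.length ≤ (candK changes i j).toNat * changes.length := by
        have : 1 ≤ (candK changes i j).toNat := by omega
        calc changes.length = 1 * changes.length := (Nat.one_mul _).symm
        _ ≤ _ := Nat.mul_le_mul_right _ this
      omega
    · have : (candK changes i j).toNat = 0 := by omega
      omega
  · rw [hsv, sVal_lt changes i hi]

-- every duplicate step dominates some valid candidate

lemma dup_cand (changes : List Int) (hn : changes ≠ []) (ht : changes.sum ≠ 0)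
    (m : Nat) (hd : dupAt changes m) :
    ∃ i j, candValid changes i j ∧ candStepN changes i j ≤ m := by
  have hn0 : 0 < changes.length := List.length_pos_iff.mpr hn
  obtain ⟨m', hm', heq⟩ := hd
  obtain ⟨q, r, hrn, hmqr⟩ : ∃ q r, r < changes.length ∧ m = q * changes.length + r :=
    ⟨m / changes.length, m % changes.length, Nat.mod_lt _ hn0, by
      rw [Nat.mul_comm]; exact (Nat.div_add_mod m _).symm⟩
  obtain ⟨q', r', hrn', hmqr'⟩ : ∃ q r, r < changes.length ∧ m' = q * changes.length + r :=
    ⟨m' / changes.length, m' % changes.length, Nat.mod_lt _ hn0, by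
      rw [Nat.mul_comm]; exact (Nat.div_add_mod m' _).symm⟩
  set n := changes.length
  rw [hmqr, sVal_qr changes q r hrn, hmqr', sVal_qr changes q' r' hrn'] at heq
  -- (q' - q) * t = p_r - p_r'  hence  p_r' - p_r = (q - q') t
  have hqq : q' ≤ q := by
    by_contra hlt
    push_neg at hlt
    have h1 : (q+1) * n ≤ q' * n := Nat.mul_le_mul_right _ (by omega)
    have h2 : (q+1) * n = q * n + n := by ring
    omega
  have hdvd : changes.sum ∣ ((changes.take r').sum - (changes.take r).sum) :=
    ⟨(q : Int) - (q' : Int), by linear_combination heq⟩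
  have hkval : candK changes r' r = (q : Int) - (q' : Int) := by
    have := candK_spec changes r' r ht hdvd
    have h2 : ((q : Int) - (q' : Int)) * changes.sum = (changes.take r').sum - (changes.take r).sum := by
      linear_combination -heq
    have := mul_right_cancel₀ ht (this.trans h2.symm)
    exact this
  rcases Nat.lt_or_ge q' q with hlt | hge
  · -- k ≥ 1
    refine ⟨r', r, ⟨hrn', hrn, hdvd, Or.inl (by rw [hkval]; omega)⟩, ?_⟩
    unfold candStepN
    rw [hkval]
    have : ((q : Int) - (q' : Int)).toNat = q - q' := by omega
    rw [this]
    calc (q - q') * n + r ≤ q * n + r := by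
          have : (q - q') * n ≤ q * n := Nat.mul_le_mul_right _ (by omega)
          omega
    _ = m := hmqr.symm
  · -- q = q', so r' < r and p_r' = p_r
    have hqe : q' = q := by omega
    have hpn : q' * n = q * n := by rw [hqe]
    have hrr : r' < r := by omega
    refine ⟨r', r, ⟨hrn', hrn, hdvd, Or.inr ⟨by rw [hkval]; omega, hrr⟩⟩, ?_⟩
    unfold candStepN
    rw [hkval]
    have : ((q : Int) - (q' : Int)).toNat = 0 := by omega
    rw [this]
    omega

-- Pre_ implies a duplicate exists within port A's fuel bound

lemma exists_dup_of_pre (changes : List Int)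
    (hpre : Pre_first_duplicate_frequency changes) :
    ∃ m, dupAt changes m ∧ m ≤ (2 * (changes.map Int.natAbs).sum + 2) * changes.length := by
  obtain ⟨hn, hcase⟩ := hpre
  have hn0 : 0 < changes.length := List.length_pos_iff.mpr hn
  set n := changes.length
  set S := (changes.map Int.natAbs).sum with hS
  rcases hcase with ht | hdup
  · -- total = 0 : step n duplicates step 0
    refine ⟨n, ⟨0, hn0, ?_⟩, by nlinarith [hn0]⟩
    rw [sVal_cycle0 changes hn, ht]
    simp [sVal]
  · -- two congruent prefix sums; here changes.sum may still be 0: treat that case first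
    by_cases ht : changes.sum = 0
    · refine ⟨n, ⟨0, hn0, ?_⟩, by nlinarith [hn0]⟩
      rw [sVal_cycle0 changes hn, ht]
      simp [sVal]
    rw [List.nodup_iff_injective_get] at hdup
    unfold Function.Injective at hdup
    push_neg at hdup
    obtain ⟨a, b, hab, hne⟩ := hdup
    obtain ⟨i, j, hij, hin, hjn, hcong⟩ : ∃ i j, i ≠ j ∧ i < n ∧ j < n ∧
        PySem.Int.mod ((changes.take i).sum) changes.sum
          = PySem.Int.mod ((changes.take j).sum) changes.sum := by
      refine ⟨a.1, b.1, (fun h => hne (Fin.ext h)), ?_, ?_, ?_⟩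
      · simpa [pvPrefix] using a.isLt
      · simpa [pvPrefix] using b.isLt
      · simpa [List.get_eq_getElem, pvPrefix] using hab
    have hdvd : changes.sum ∣ ((changes.take i).sum - (changes.take j).sum) :=
      mod_eq_imp_dvd _ _ _ hcong
    have hdvd' : changes.sum ∣ ((changes.take j).sum - (changes.take i).sum) :=
      (dvd_sub_comm).mp hdvd
    have hks := candK_spec changes i j ht hdvd
    have hks' := candK_spec changes j i ht hdvd'
    have hsum : candK changes i j + candK changes j i = 0 := by
      have : (candK changes i j + candK changes j i) * changes.sum = 0 := by
        rw [add_mul, hks, hks']; ring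
      rcases mul_eq_zero.mp this with h | h
      · exact h
      · exact absurd h ht
    -- generic conclusion from a valid pair whose candK is bounded by 2*S
    have hfin : ∀ i' j' : Nat, candValid changes i' j' → (candK changes i' j').toNat ≤ 2 * S →
        ∃ m, dupAt changes m ∧ m ≤ (2 * S + 2) * n := by
      intro i' j' hv hkb
      refine ⟨candStepN changes i' j', (cand_dup changes i' j' ht hv).1, ?_⟩
      unfold candStepN
      have h1 : (candK changes i' j').toNat * changes.length ≤ (2 * S) * n :=
        Nat.mul_le_mul_right _ hkb
      have h2 : (2 * S + 2) * n = 2 * S * n + n + n := by ring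
      have hj' : j' < n := hv.2.1
      omega
    -- |candK| is bounded by 2*S whenever it is the exact quotient
    have habs : ∀ i' j' : Nat, (candK changes i' j' * changes.sum
          = (changes.take i').sum - (changes.take j').sum) → (candK changes i' j').toNat ≤ 2 * S := by
      intro i' j' hexact
      have h1 : (candK changes i' j').natAbs * (changes.sum).natAbs
          = ((changes.take i').sum - (changes.take j').sum).natAbs := by
        rw [← Int.natAbs_mul, hexact]
      have h2 : ((changes.take i').sum - (changes.take j').sum).natAbs
          ≤ ((changes.take i').sum).natAbs + ((changes.take j').sum).natAbs := Int.natAbs_sub_le _ _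
      have h3 := abs_take_sum_le changes i'
      have h4 := abs_take_sum_le changes j'
      have h5 : 1 ≤ (changes.sum).natAbs := by
        rcases Nat.eq_zero_or_pos (changes.sum).natAbs with h | h
        · exact absurd (Int.natAbs_eq_zero.mp h) ht
        · exact h
      have h6 : (candK changes i' j').natAbs ≤ (candK changes i' j').natAbs * (changes.sum).natAbs :=
        Nat.le_mul_of_pos_right _ h5
      have h7 : (candK changes i' j').toNat ≤ (candK changes i' j').natAbs := by omega
      omega
    rcases lt_trichotomy (candK changes i j) 0 with hk | hk | hk
    · -- use the pair (j, i)
      have hk' : 1 ≤ candK changes j i := by omega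
      exact hfin j i ⟨hjn, hin, hdvd', Or.inl hk'⟩ (habs j i hks')
    · -- the two prefix sums are equal: order the indices
      have hk' : candK changes j i = 0 := by omega
      rcases Nat.lt_or_ge i j with hij' | hij'
      · exact hfin i j ⟨hin, hjn, hdvd, Or.inr ⟨hk, hij'⟩⟩ (habs i j hks)
      · have : j < i := by omega
        exact hfin j i ⟨hjn, hin, hdvd', Or.inr ⟨hk', this⟩⟩ (habs j i hks')
    · exact hfin i j ⟨hin, hjn, hdvd, Or.inl (by omega)⟩ (habs i j hks)

lemma fdfInner_spec (changes : List Int) (hn : changes ≠ [])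
    (M : Nat) (hd : dupAt changes M) (hmin : ∀ m < M, ¬ dupAt changes m) :
    ∀ (rest : List Int) (q r : Nat) (current : Int) (seen : PySem.Set Int),
      rest = changes.drop r → r ≤ changes.length →
      current = sVal changes (q * changes.length + r) →
      (∀ x : Int, x ∈ seen ↔ ∃ m' ≤ q * changes.length + r, sVal changes m' = x) →
      q * changes.length + r < M →
      (M ≤ (q+1) * changes.length ∧ fdfInner rest current seen = Sum.inl (sVal changes M))
      ∨ ((q+1) * changes.length < M ∧ ∃ seen',
          fdfInner rest current seen = Sum.inr (sVal changes ((q+1) * changes.length), seen')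
          ∧ ∀ x : Int, x ∈ seen' ↔ ∃ m' ≤ (q+1) * changes.length, sVal changes m' = x) := by
  intro rest
  induction rest with
  | nil =>
    intro q r current seen hrest hrle hcur hseen hlt
    have hr : r = changes.length := by
      have := congrArg List.length hrest
      simp [List.length_drop] at this
      omega
    subst hr
    have hq1 : (q+1) * changes.length = q * changes.length + changes.length := by ring
    right
    refine ⟨by omega, seen, ?_, ?_⟩
    · show Sum.inr (current, seen) = _
      rw [hcur, hq1]
    · intro x; rw [hseen x, hq1]
  | cons c rest' ih =>
    intro q r current seen hrest hrle hcur hseen hlt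
    have hrn : r < changes.length := by
      by_contra h
      push_neg at h
      have : changes.drop r = [] := List.drop_eq_nil_of_le h
      rw [this] at hrest
      exact (List.cons_ne_nil c rest') hrest
    have hc : changes.getD r 0 = c := by
      have h0 : (changes.drop r)[0]? = some c := by rw [← hrest]; simp
      rw [List.getElem?_drop] at h0
      simp only [Nat.add_zero] at h0
      simp [List.getD_eq_getElem?_getD, h0]
    have hmr : (q * changes.length + r) % changes.length = r := by
      rw [Nat.mul_comm, Nat.mul_add_mod, Nat.mod_eq_of_lt hrn]
    have hcur1 : current + c = sVal changes (q * changes.length + r + 1) := by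
      rw [sVal_step changes _ hn, hmr, hc, hcur]
    have hcontains : PySem.Set.contains seen (current + c) = true
        ↔ dupAt changes (q * changes.length + r + 1) := by
      rw [PySem.Set.contains_iff, hseen, hcur1]
      unfold dupAt
      constructor
      · rintro ⟨m', hm', he⟩; exact ⟨m', by omega, he⟩
      · rintro ⟨m', hm', he⟩; exact ⟨m', by omega, he⟩
    have hstep : fdfInner (c :: rest') current seen
        = if PySem.Set.contains seen (current + c) then Sum.inl (current + c)
          else fdfInner rest' (current + c) (PySem.Set.add seen (current + c)) := rfl
    by_cases hdup : PySem.Set.contains seen (current + c)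
    · have hdupat := hcontains.mp hdup
      have hMle : M ≤ q * changes.length + r + 1 := by
        by_contra h
        push_neg at h
        exact hmin _ h hdupat
      have hMeq : M = q * changes.length + r + 1 := by omega
      left
      constructor
      · have h2 : (q+1) * changes.length = q * changes.length + changes.length := by ring
        omega
      · rw [hstep, if_pos hdup, hcur1, hMeq]
    · have hndup : ¬ dupAt changes (q * changes.length + r + 1) := fun h => hdup (hcontains.mpr h)
      have hMne : M ≠ q * changes.length + r + 1 := fun h => hndup (h ▸ hd)
      have hMgt : q * changes.length + r + 1 < M := by omega
      have hrec := ih q (r+1) (current + c) (PySem.Set.add seen (current + c))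
        (by
          have : changes.drop (r+1) = (changes.drop r).drop 1 := by
            rw [List.drop_drop]
          rw [this, ← hrest, List.drop_one, List.tail_cons])
        (by omega)
        (by
          have hx : q * changes.length + (r+1) = q * changes.length + r + 1 := by omega
          rw [hx]; exact hcur1)
        (by
          intro x
          rw [PySem.Set.mem_add _ _ _, hseen x]
          constructor
          · rintro (⟨m', hm', he⟩ | he)
            · exact ⟨m', by omega, he⟩
            · exact ⟨q * changes.length + r + 1, by omega, by rw [← hcur1, he]⟩
          · rintro ⟨m', hm', he⟩
            rcases Nat.lt_or_ge m' (q * changes.length + r + 1) with h | h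
            · exact Or.inl ⟨m', by omega, he⟩
            · have : m' = q * changes.length + r + 1 := by omega
              exact Or.inr (by rw [← he, this, hcur1])
        )
        (by omega)
      rw [hstep, if_neg hdup]
      exact hrec

lemma fdfLoop_spec (changes : List Int) (hn : changes ≠ [])
    (M : Nat) (hd : dupAt changes M) (hmin : ∀ m < M, ¬ dupAt changes m) :
    ∀ (fuel q : Nat) (current : Int) (seen : PySem.Set Int),
      current = sVal changes (q * changes.length) →
      (∀ x : Int, x ∈ seen ↔ ∃ m' ≤ q * changes.length, sVal changes m' = x) →
      q * changes.length < M →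
      M ≤ q * changes.length + fuel * changes.length →
      fdfLoop changes fuel current seen = sVal changes M := by
  intro fuel
  induction fuel with
  | zero =>
    intro q current seen hcur hseen hlt hfuel
    exfalso
    simp at hfuel
    omega
  | succ fuel ih =>
    intro q current seen hcur hseen hlt hfuel
    have := fdfInner_spec changes hn M hd hmin changes q 0 current seen
      (by simp) (Nat.zero_le _) (by simpa using hcur) (by simpa using hseen) (by simpa using hlt)
    rcases this with ⟨hle, heq⟩ | ⟨hgt, seen', heq, hseen'⟩
    · show (match fdfInner changes current seen with
        | Sum.inl r => r
        | Sum.inr (cur, s) => fdfLoop changes fuel cur s) = sVal changes M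
      rw [heq]
    · show (match fdfInner changes current seen with
        | Sum.inl r => r
        | Sum.inr (cur, s) => fdfLoop changes fuel cur s) = sVal changes M
      rw [heq]
      exact ih (q+1) _ seen' rfl hseen' hgt (by
        have h2 : (q+1) * changes.length = q * changes.length + changes.length := by ring
        have h3 : (fuel+1) * changes.length = fuel * changes.length + changes.length := by ring
        omega)

lemma portA_eq (changes : List Int) (hn : changes ≠ [])
    (M : Nat) (hd : dupAt changes M) (hmin : ∀ m < M, ¬ dupAt changes m)
    (hMb : M ≤ (2 * (changes.map Int.natAbs).sum + 2) * changes.length) :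
    first_duplicate_frequency changes = sVal changes M := by
  have hM0 : 0 < M := by
    rcases Nat.eq_zero_or_pos M with h | h
    · obtain ⟨m', hm', _⟩ := hd; omega
    · exact h
  unfold first_duplicate_frequency
  apply fdfLoop_spec changes hn M hd hmin _ 0
  · simpa using (sVal_zero changes).symm
  · intro x
    constructor
    · intro hx
      have hx0 : x = 0 := by
        rcases (PySem.Set.mem_add _ _ _).mp hx with h | h
        · simp [PySem.Set.empty] at h
        · exact h
      exact ⟨0, by omega, by rw [sVal_zero, hx0]⟩
    · rintro ⟨m', hm', he⟩
      have : m' = 0 := by omega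
      rw [this, sVal_zero] at he
      rw [PySem.Set.mem_add _ _ _]
      right
      exact he.symm
  · simpa using hM0
  · simpa using hMb

lemma foldl_updMin_spec {γ : Type} (f : γ → Option (Int × Int)) (l : List γ) :
    (l.foldl (fun b x => updMin b (f x)) none = none ∧ ∀ x ∈ l, f x = none)
    ∨ (∃ p, l.foldl (fun b x => updMin b (f x)) none = some p
        ∧ (∃ x ∈ l, f x = some p)
        ∧ ∀ x ∈ l, ∀ q, f x = some q → p.1 ≤ q.1) := by
  induction l using List.reverseRecOn with
  | nil => left; simp
  | append_singleton l x ih =>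
    rw [List.foldl_append]
    rcases ih with ⟨hnone, hall⟩ | ⟨p, hp, ⟨y, hy, hfy⟩, hmin⟩
    · rw [hnone]
      simp only [List.foldl_cons, List.foldl_nil]
      cases hfx : f x with
      | none =>
        left
        constructor
        · simp [updMin, hfx]
        · intro z hz
          rcases List.mem_append.mp hz with h | h
          · exact hall z h
          · rw [List.mem_singleton.mp h]; exact hfx
      | some c =>
        right
        refine ⟨c, by simp [updMin, hfx], ⟨x, by simp, hfx⟩, ?_⟩
        intro z hz q hq
        rcases List.mem_append.mp hz with h | h
        · rw [hall z h] at hq; cases hq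
        · rw [List.mem_singleton.mp h] at hq; rw [hfx] at hq; cases hq; omega
    · rw [hp]
      simp only [List.foldl_cons, List.foldl_nil]
      cases hfx : f x with
      | none =>
        right
        refine ⟨p, by simp [updMin, hfx], ⟨y, by simp [hy], hfy⟩, ?_⟩
        intro z hz q hq
        rcases List.mem_append.mp hz with h | h
        · exact hmin z h q hq
        · rw [List.mem_singleton.mp h] at hq; rw [hfx] at hq; cases hq
      | some c =>
        right
        by_cases hlt : c.1 < p.1
        · refine ⟨c, by simp [updMin, hfx, hlt], ⟨x, by simp, hfx⟩, ?_⟩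
          intro z hz q hq
          rcases List.mem_append.mp hz with h | h
          · have := hmin z h q hq; omega
          · rw [List.mem_singleton.mp h] at hq; rw [hfx] at hq; cases hq; omega
        · refine ⟨p, by simp [updMin, hfx, hlt], ⟨y, by simp [hy], hfy⟩, ?_⟩
          intro z hz q hq
          rcases List.mem_append.mp hz with h | h
          · exact hmin z h q hq
          · rw [List.mem_singleton.mp h] at hq; rw [hfx] at hq; cases hq; omega

lemma foldl_foldl_flatMap {α β γ : Type} (l₁ : List α) (l₂ : List β)
    (g : γ → α × β → γ) (init : γ) :
    l₁.foldl (fun b j => l₂.foldl (fun b i => g b (j, i)) b) init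
      = (l₁.flatMap (fun j => l₂.map (fun i => (j, i)))).foldl g init := by
  induction l₁ generalizing init with
  | nil => simp
  | cons a l ih =>
    simp only [List.foldl_cons, List.flatMap_cons, List.foldl_append]
    rw [ih, List.foldl_map]

lemma fdfScan_aux (changes : List Int) (hn : changes ≠ []) (ht : changes.sum = 0)
    (M : Nat) (hd : dupAt changes M) (hmin : ∀ m < M, ¬ dupAt changes m) :
    ∀ (rest : List Int) (j : Nat) (seen : PySem.Set Int),
      rest = (pvPrefix changes).drop j → j ≤ changes.length →
      (∀ x : Int, x ∈ seen ↔ ∃ m' < j, sVal changes m' = x) →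
      (∀ m < j, ¬ dupAt changes m) →
      fdfScan rest seen = sVal changes M := by
  intro rest
  induction rest with
  | nil =>
    intro j seen hrest hjle hseen hnod
    have hj : j = changes.length := by
      have := congrArg List.length hrest
      simp [List.length_drop, pvPrefix_length] at this
      omega
    have hdn : dupAt changes changes.length :=
      ⟨0, List.length_pos_iff.mpr hn, by
        rw [sVal_cycle0 changes hn, ht]; simp [sVal]⟩
    have hMn : M = changes.length := by
      have h1 : M ≤ changes.length := by
        by_contra h
        push_neg at h
        exact hmin _ h hdn
      rcases Nat.lt_or_ge M changes.length with h | h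
      · exact absurd hd (hnod M (by omega))
      · omega
    show (0 : Int) = sVal changes M
    rw [hMn, sVal_cycle0 changes hn, ht]
  | cons p rest' ih =>
    intro j seen hrest hjle hseen hnod
    have hjn : j < changes.length := by
      by_contra h
      push_neg at h
      have : (pvPrefix changes).drop j = [] :=
        List.drop_eq_nil_of_le (by rw [pvPrefix_length]; omega)
      rw [this] at hrest
      exact (List.cons_ne_nil p rest') hrest
    have hp : p = (changes.take j).sum := by
      have h0 : ((pvPrefix changes).drop j)[0]? = some p := by rw [← hrest]; simp
      rw [List.getElem?_drop, Nat.add_zero] at h0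
      have : (pvPrefix changes)[j]? = some ((changes.take j).sum) := by
        rw [List.getElem?_eq_getElem (by rw [pvPrefix_length]; omega)]
        simp [pvPrefix]
      rw [this] at h0
      exact (Option.some_inj.mp h0).symm
    have hpj : p = sVal changes j := by rw [hp, sVal_lt changes j hjn]
    have hcontains : PySem.Set.contains seen p = true ↔ dupAt changes j := by
      rw [PySem.Set.contains_iff, hseen, hpj]
      rfl
    show (if PySem.Set.contains seen p then p else fdfScan rest' (PySem.Set.add seen p)) = _
    by_cases hdup : PySem.Set.contains seen p
    · rw [if_pos hdup]
      have hdj := hcontains.mp hdup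
      have hMj : M = j := by
        have h1 : M ≤ j := by
          by_contra h
          push_neg at h
          exact hmin _ h hdj
        rcases Nat.lt_or_ge M j with h | h
        · exact absurd hd (hnod M h)
        · omega
      rw [hpj, hMj]
    · rw [if_neg hdup]
      have hndup : ¬ dupAt changes j := fun h => hdup (hcontains.mpr h)
      apply ih (j+1) _
      · have : (pvPrefix changes).drop (j+1) = ((pvPrefix changes).drop j).drop 1 := by
          rw [List.drop_drop]
        rw [this, ← hrest, List.drop_one, List.tail_cons]
      · omega
      · intro x
        rw [PySem.Set.mem_add _ _ _, hseen x]
        constructor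
        · rintro (⟨m', hm', he⟩ | he)
          · exact ⟨m', by omega, he⟩
          · exact ⟨j, by omega, by rw [← hpj, he]⟩
        · rintro ⟨m', hm', he⟩
          rcases Nat.lt_or_ge m' j with h | h
          · exact Or.inl ⟨m', h, he⟩
          · have : m' = j := by omega
            exact Or.inr (by rw [← he, this, hpj])
      · intro m hm
        rcases Nat.lt_or_ge m j with h | h
        · exact hnod m h
        · have : m = j := by omega
          rw [this]; exact hndup

lemma fdfScan_spec (changes : List Int) (hn : changes ≠ []) (ht : changes.sum = 0)
    (M : Nat) (hd : dupAt changes M) (hmin : ∀ m < M, ¬ dupAt changes m) :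
    fdfScan (pvPrefix changes) PySem.Set.empty = sVal changes M := by
  apply fdfScan_aux changes hn ht M hd hmin _ 0
  · simp
  · exact Nat.zero_le _
  · intro x
    constructor
    · intro hx; exact absurd hx (by simp [PySem.Set.empty])
    · rintro ⟨m', hm', _⟩; omega
  · intro m hm; omega

lemma fdfBest_eq_fold (pref : List Int) (total n : Int) :
    fdfBest pref total n
      = ((PySem.List.pyRange 0 n 1).flatMap
          (fun j => (PySem.List.pyRange 0 n 1).map (fun i => (j, i)))).foldl
          (fun b x => updMin b (candOptI pref total n x)) none := by
  unfold fdfBest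
  rw [← foldl_foldl_flatMap]
  congr 1
  funext best j
  congr 1
  funext b i
  simp only [candOptI, updMin]
  split_ifs with h1 h2
  · cases b <;> rfl
  · rfl
  · rfl

lemma pvPrefix_getD (changes : List Int) (i : Nat) (hi : i < changes.length) :
    PySem.List.pyGetD (pvPrefix changes) ((i : Nat) : Int) 0 = (changes.take i).sum := by
  rw [PySem.List.pyGetD_natCast]
  rw [List.getD_eq_getElem?_getD, List.getElem?_eq_getElem (by rw [pvPrefix_length]; omega)]
  simp [pvPrefix]

-- candOptI at a Nat-cast pair computes exactly the valid-candidate data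

lemma candOptI_char_pos (changes : List Int) (iN jN : Nat)
    (hi : iN < changes.length) (hj : jN < changes.length)
    (hv : candValid changes iN jN) :
    candOptI (pvPrefix changes) changes.sum ((changes.length : Int)) ((jN : Int), (iN : Int))
      = some (((candStepN changes iN jN : Nat) : Int), (changes.take iN).sum) := by
  obtain ⟨_, _, hdvd, hval⟩ := hv
  unfold candOptI
  simp only [pvPrefix_getD changes iN hi, pvPrefix_getD changes jN hj]
  simp only [PySem.Int.mod_eq_zero_iff_dvd]
  rw [if_pos hdvd]
  have hkk : PySem.Int.floordiv ((changes.take iN).sum - (changes.take jN).sum) changes.sum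
      = candK changes iN jN := rfl
  rw [hkk]
  have hv' : 1 ≤ candK changes iN jN ∨ (candK changes iN jN = 0 ∧ (iN : Int) < (jN : Int)) := by
    rcases hval with h | ⟨h1, h2⟩
    · exact Or.inl h
    · exact Or.inr ⟨h1, by exact_mod_cast h2⟩
  rw [if_pos hv']
  have hk0 : 0 ≤ candK changes iN jN := by
    rcases hval with h | ⟨h1, _⟩ <;> omega
  congr 2
  unfold candStepN
  push_cast
  rw [Int.toNat_of_nonneg hk0]

lemma candOptI_char_neg (changes : List Int) (ht : changes.sum ≠ 0) (iN jN : Nat)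
    (hi : iN < changes.length) (hj : jN < changes.length)
    (hv : ¬ candValid changes iN jN) :
    candOptI (pvPrefix changes) changes.sum ((changes.length : Int)) ((jN : Int), (iN : Int))
      = none := by
  unfold candOptI
  simp only [pvPrefix_getD changes iN hi, pvPrefix_getD changes jN hj]
  simp only [PySem.Int.mod_eq_zero_iff_dvd]
  by_cases hdvd : changes.sum ∣ ((changes.take iN).sum - (changes.take jN).sum)
  · rw [if_pos hdvd]
    have hkk : PySem.Int.floordiv ((changes.take iN).sum - (changes.take jN).sum) changes.sum
        = candK changes iN jN := rfl
    rw [hkk, if_neg ?_]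
    intro hv'
    apply hv
    refine ⟨hi, hj, hdvd, ?_⟩
    rcases hv' with h | ⟨h1, h2⟩
    · exact Or.inl h
    · exact Or.inr ⟨h1, by exact_mod_cast h2⟩
  · rw [if_neg hdvd]

lemma portB_eq (changes : List Int) (hn : changes ≠ [])
    (M : Nat) (hd : dupAt changes M) (hmin : ∀ m < M, ¬ dupAt changes m) :
    first_duplicate_frequency_alt changes = sVal changes M := by
  unfold first_duplicate_frequency_alt
  rw [prefix_fold]
  by_cases ht : changes.sum = 0
  · simpa [ht] using fdfScan_spec changes hn ht M hd hmin
  · show (if changes.sum = 0 then fdfScan (pvPrefix changes) PySem.Set.empty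
      else ((fdfBest (pvPrefix changes) changes.sum (PySem.List.len changes)).getD (0, 0)).2)
      = sVal changes M
    rw [if_neg ht]
    have hlen : PySem.List.len changes = ((changes.length : Nat) : Int) := by
      simp [PySem.List.len_eq]
    rw [hlen, fdfBest_eq_fold]
    set L := ((PySem.List.pyRange 0 ((changes.length : Nat) : Int) 1).flatMap
      (fun j => (PySem.List.pyRange 0 ((changes.length : Nat) : Int) 1).map (fun i => (j, i)))) with hL
    have hmemL : ∀ j i : Int, (j, i) ∈ L ↔
        (0 ≤ j ∧ j < (changes.length : Int)) ∧ (0 ≤ i ∧ i < (changes.length : Int)) := by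
      intro j i
      rw [hL, List.mem_flatMap]
      constructor
      · rintro ⟨j', hjmem, hx⟩
        rw [List.mem_map] at hx
        obtain ⟨i', himem, hxe⟩ := hx
        rw [PySem.List.mem_pyRange_one] at hjmem himem
        cases hxe
        exact ⟨hjmem, himem⟩
      · rintro ⟨h1, h2⟩
        refine ⟨j, ?_, ?_⟩
        · rw [PySem.List.mem_pyRange_one]; exact h1
        · rw [List.mem_map]
          exact ⟨i, by rw [PySem.List.mem_pyRange_one]; exact h2, rfl⟩
    rcases foldl_updMin_spec (candOptI (pvPrefix changes) changes.sum ((changes.length : Nat) : Int)) L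
      with ⟨hnone, hall⟩ | ⟨p, hp, ⟨x, hxmem, hfx⟩, hminp⟩
    · -- impossible: a valid candidate exists since M is a duplicate step
      exfalso
      obtain ⟨i1, j1, hv1, _⟩ := dup_cand changes hn ht M hd
      have hmem : ((j1 : Int), (i1 : Int)) ∈ L := by
        rw [hmemL]
        exact ⟨⟨by positivity, by exact_mod_cast hv1.2.1⟩, by positivity, by exact_mod_cast hv1.1⟩
      have := hall _ hmem
      rw [candOptI_char_pos changes i1 j1 hv1.1 hv1.2.1 hv1] at this
      cases this
    · rw [hp]
      -- x is a Nat-cast pair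
      have hxb := (hmemL x.1 x.2).mp (by simpa using hxmem)
      obtain ⟨jN, hjN⟩ : ∃ jN : Nat, x.1 = (jN : Int) := ⟨x.1.toNat, by omega⟩
      obtain ⟨iN, hiN⟩ : ∃ iN : Nat, x.2 = (iN : Int) := ⟨x.2.toNat, by omega⟩
      have hiNlt : iN < changes.length := by omega
      have hjNlt : jN < changes.length := by omega
      have hxpair : x = ((jN : Int), (iN : Int)) := by
        cases x; simp at hjN hiN ⊢; exact ⟨hjN, hiN⟩
      rw [hxpair] at hfx
      by_cases hv : candValid changes iN jN
      · rw [candOptI_char_pos changes iN jN hiNlt hjNlt hv] at hfx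
        have hpe : p = (((candStepN changes iN jN : Nat) : Int), (changes.take iN).sum) :=
          (Option.some_inj.mp hfx).symm
        -- M ≤ candStepN i j
        have hMle : M ≤ candStepN changes iN jN := by
          by_contra h
          push_neg at h
          exact hmin _ h (cand_dup changes iN jN ht hv).1
        -- candStepN i j ≤ M via the minimality of p over the candidate at M
        have hge : candStepN changes iN jN ≤ M := by
          obtain ⟨i1, j1, hv1, hs1⟩ := dup_cand changes hn ht M hd
          have hmem : ((j1 : Int), (i1 : Int)) ∈ L := by
            rw [hmemL]
            refine ⟨⟨by positivity, by exact_mod_cast hv1.2.1⟩, by positivity, by exact_mod_cast hv1.1⟩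
          have h2 := hminp _ hmem _ (by
            rw [candOptI_char_pos changes i1 j1 hv1.1 hv1.2.1 hv1])
          rw [hpe] at h2
          simp only at h2
          have : (candStepN changes iN jN : Int) ≤ (candStepN changes i1 j1 : Int) := h2
          omega
        have hMeq : candStepN changes iN jN = M := by omega
        rw [hpe]
        show (changes.take iN).sum = sVal changes M
        rw [← hMeq, (cand_dup changes iN jN ht hv).2]
      · rw [candOptI_char_neg changes ht iN jN hiNlt hjNlt hv] at hfx
        cases hfx

-- ===== VERDICT (by name: the statement is the Claim_ definition above) =====
theorem first_duplicate_frequency_spec : Claim_equal_first_duplicate_frequency := by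
  intro changes _ hpre
  unfold Spec_first_duplicate_frequency
  obtain ⟨m0, hm0, hm0b⟩ := exists_dup_of_pre changes hpre
  haveI : DecidablePred (dupAt changes) := Classical.decPred _
  have hex : ∃ m, dupAt changes m := ⟨m0, hm0⟩
  have hd := Nat.find_spec hex
  have hmin : ∀ m < Nat.find hex, ¬ dupAt changes m := fun m hm => Nat.find_min hex hm
  have hMb : Nat.find hex ≤ (2 * (changes.map Int.natAbs).sum + 2) * changes.length :=
    le_trans (Nat.find_min' hex hm0) hm0b
  rw [portA_eq changes hpre.1 _ hd hmin hMb, portB_eq changes hpre.1 _ hd hmin]
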